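-- pv_equiv track=rewrite | github.com/Javil01/inbxr- | modules/spam_diagnostic.py | _dedupe_and_rank
-- ===== SOURCE A (Python) =====
-- _SEVERITY_WEIGHT = {
--     "critical": 100,
--     "high": 70,
--     "medium": 40,
--     "low": 15,
--     "warning": 25,
--     "info": 5,
-- }
--
-- def _severity_weight(sev):
--     """Normalize a severity string to a numeric weight."""
--     return _SEVERITY_WEIGHT.get((sev or "").lower(), 10)
--
-- def _dedupe_and_rank(flags):
--     """Remove duplicate findings and rank by severity weight. Two flags
--     are considered duplicates if their item text matches after normalizing
--     whitespace and case. First occurrence wins."""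
--     seen = set()
--     unique = []
--     for f in flags:
--         key = (f.get("item") or "").strip().lower()
--         if not key or key in seen:
--             continue
--         seen.add(key)
--         unique.append(f)
--
--     unique.sort(key=lambda x: _severity_weight(x.get("severity")), reverse=True)
--     return unique
-- ===== SOURCE B (Python) =====
-- _SEVERITY_WEIGHT = {
--     "critical": 100,
--     "high": 70,
--     "medium": 40,
--     "low": 15,
--     "warning": 25,
--     "info": 5,
-- }
--
--
-- def _severity_weight(sev):
--     return _SEVERITY_WEIGHT.get((sev or "").lower(), 10)
--
--
-- def _dedupe_and_rank(flags):
--     """Same result as A: dedupe by normalized item text (first occurrence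
--     wins), rank by severity weight descending, stable.  Instead of
--     collecting a list and sorting it, a SINGLE pass drops duplicates and
--     distributes each kept flag into a per-weight bucket; the buckets are
--     keyed by every possible weight in descending order, so concatenating
--     them in dict order is already the ranked result."""
--     buckets = {w: [] for w in (100, 70, 40, 25, 15, 10, 5)}
--     seen = set()
--     for f in flags:
--         key = (f.get("item") or "").strip().lower()
--         if key and key not in seen:
--             seen.add(key)
--             buckets[_severity_weight(f.get("severity"))].append(f)
--     out = []
--     for bucket in buckets.values():
--         out += bucket
--     return out
-- ===== Notes on version B (the rewrite author's own statement) =====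
-- stated objective: alternative
-- what changed: Instead of collecting a deduped list and stable-reverse-sorting it by severity weight, B makes a single pass that drops duplicates and appends each kept flag to a per-weight bucket in a dict pre-keyed with all seven possible weights in descending order, then concatenates the buckets in dict order; no sort is performed.
import Mathlib
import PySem

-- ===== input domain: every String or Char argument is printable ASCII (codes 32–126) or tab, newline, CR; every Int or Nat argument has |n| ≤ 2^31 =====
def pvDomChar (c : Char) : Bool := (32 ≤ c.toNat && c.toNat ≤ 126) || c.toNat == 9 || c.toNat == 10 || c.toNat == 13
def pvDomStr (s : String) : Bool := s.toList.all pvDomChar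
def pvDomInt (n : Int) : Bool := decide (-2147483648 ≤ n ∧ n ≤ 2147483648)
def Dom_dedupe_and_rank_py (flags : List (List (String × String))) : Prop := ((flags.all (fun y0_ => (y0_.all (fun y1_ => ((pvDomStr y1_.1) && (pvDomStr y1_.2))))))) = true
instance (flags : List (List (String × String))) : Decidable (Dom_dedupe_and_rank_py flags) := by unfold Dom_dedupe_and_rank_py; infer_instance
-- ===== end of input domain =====

-- B replaces A's collect-then-stable-reverse-sort by a single pass that distributes each
-- kept flag into per-weight buckets pre-keyed in descending weight order (objective: alternative).

-- ===== PORT A =====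
def pvSeverityTable : PySem.Dict String Int :=
  PySem.Dict.ofList
    [("critical", 100), ("high", 70), ("medium", 40), ("low", 15), ("warning", 25), ("info", 5)]

-- _severity_weight(sev) = _SEVERITY_WEIGHT.get((sev or "").lower(), 10)
def severity_weight_py (sev : Option String) : Int :=
  PySem.Dict.getD pvSeverityTable (PySem.Str.lower (sev.getD "")) 10

-- (f.get("item") or "").strip().lower() — the same expression in A's and B's Python
def pvNormItem (f : List (String × String)) : String :=
  PySem.Str.lower (PySem.Str.strip (((PySem.Dict.mk f).get? "item").getD ""))

-- the dedup loop of A: state (seen, unique)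
def pvDedupA (flags : List (List (String × String))) :
    PySem.Set String × List (List (String × String)) :=
  flags.foldl
    (fun st f =>
      if pvNormItem f = "" ∨ PySem.Set.contains st.1 (pvNormItem f) then st
      else (PySem.Set.add st.1 (pvNormItem f), st.2 ++ [f]))
    (PySem.Set.empty, [])

def dedupe_and_rank_py (flags : List (List (String × String))) : List (List (String × String)) :=
  PySem.List.sorted (pvDedupA flags).2
    (fun x => severity_weight_py ((PySem.Dict.mk x).get? "severity")) true

-- ===== PORT B =====
-- buckets = {w: [] for w in (100, 70, 40, 25, 15, 10, 5)}
def pvInitBuckets : PySem.Dict Int (List (List (String × String))) :=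
  PySem.Dict.ofList ([100, 70, 40, 25, 15, 10, 5].map (fun w => (w, ([] : List (List (String × String))))))

-- B's single pass: skip empty/seen items, append each kept flag to its weight's bucket.
-- (buckets[w].append(f) is ported as Dict.modify with default []: exact here, since every
-- weight _severity_weight returns is a key of pvInitBuckets.)
def pvDistribute (fs : List (List (String × String))) (seen : PySem.Set String)
    (buckets : PySem.Dict Int (List (List (String × String)))) :
    PySem.Dict Int (List (List (String × String))) :=
  match fs with
  | [] => buckets
  | f :: rest =>
    if pvNormItem f ≠ "" ∧ ¬ PySem.Set.contains seen (pvNormItem f) then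
      pvDistribute rest (PySem.Set.add seen (pvNormItem f))
        (PySem.Dict.modify buckets (severity_weight_py ((PySem.Dict.mk f).get? "severity")) []
          (fun b => b ++ [f]))
    else pvDistribute rest seen buckets

-- out = []; for bucket in buckets.values(): out += bucket
def dedupe_and_rank_py_alt (flags : List (List (String × String))) : List (List (String × String)) :=
  ((pvDistribute flags PySem.Set.empty pvInitBuckets).values).foldl (· ++ ·) []

-- ===== PRECONDITION & SPEC =====
def Spec_dedupe_and_rank_py (flags : List (List (String × String))) (out : List (List (String × String))) : Prop := out = dedupe_and_rank_py_alt flags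
instance (flags : List (List (String × String))) (out : List (List (String × String))) : Decidable (Spec_dedupe_and_rank_py flags out) := by unfold Spec_dedupe_and_rank_py; infer_instance

-- ===== CLAIM (what is proved, stated in full; the proofs are below) =====
def Claim_equal_dedupe_and_rank_py : Prop := ∀ (flags : List (List (String × String))), Dom_dedupe_and_rank_py flags → Spec_dedupe_and_rank_py flags (dedupe_and_rank_py flags)

-- ===== LEMMAS AND PROOFS =====

-- abbreviations for the proofs (not used by the ports)
def pvWt (f : List (String × String)) : Int :=
  severity_weight_py ((PySem.Dict.mk f).get? "severity")

def pvScale : List Int := [100, 70, 40, 25, 15, 10, 5]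

-- the list of flags A's dedup loop keeps, starting from a given seen-set
def pvKept (fs : List (List (String × String))) (seen : PySem.Set String) :
    List (List (String × String)) :=
  match fs with
  | [] => []
  | f :: rest =>
    if pvNormItem f = "" ∨ PySem.Set.contains seen (pvNormItem f) then pvKept rest seen
    else f :: pvKept rest (PySem.Set.add seen (pvNormItem f))

-- A's fold from any state appends exactly the kept flags
theorem pvDedupA_foldl (fs : List (List (String × String)))
    (seen : PySem.Set String) (u : List (List (String × String))) :
    fs.foldl
      (fun st f =>
        if pvNormItem f = "" ∨ PySem.Set.contains st.1 (pvNormItem f) then st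
        else (PySem.Set.add st.1 (pvNormItem f), st.2 ++ [f]))
      (seen, u)
    = ((fs.foldl (fun s f =>
          if pvNormItem f = "" ∨ PySem.Set.contains s (pvNormItem f) then s
          else PySem.Set.add s (pvNormItem f)) seen), u ++ pvKept fs seen) := by
  induction fs generalizing seen u with
  | nil => simp [pvKept]
  | cons f rest ih =>
    simp only [List.foldl_cons, pvKept]
    by_cases h : pvNormItem f = "" ∨ PySem.Set.contains seen (pvNormItem f) = true
    · rw [if_pos h]; simp only [if_pos h]; exact ih seen u
    · rw [if_neg h]; simp only [if_neg h]
      rw [ih (PySem.Set.add seen (pvNormItem f)) (u ++ [f])]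
      simp

theorem pvDedupA_snd (flags : List (List (String × String))) :
    (pvDedupA flags).2 = pvKept flags PySem.Set.empty := by
  unfold pvDedupA
  rw [pvDedupA_foldl flags PySem.Set.empty []]
  simp

-- B's pass is the bucket-fold over the kept flags
theorem pvDistribute_eq (fs : List (List (String × String)))
    (seen : PySem.Set String) (buckets : PySem.Dict Int (List (List (String × String)))) :
    pvDistribute fs seen buckets
      = (pvKept fs seen).foldl (fun d f => d.modify (pvWt f) [] (fun b => b ++ [f])) buckets := by
  induction fs generalizing seen buckets with
  | nil => rfl
  | cons f rest ih =>
    by_cases h1 : pvNormItem f = ""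
    · simp [pvDistribute, pvKept, h1, ih]
    · by_cases h2 : pvNormItem f ∈ seen
      · simp [pvDistribute, pvKept, h1, h2, ih]
      · simp [pvDistribute, pvKept, h1, h2, ih, pvWt]

-- every severity weight lies on the scale
theorem severity_weight_mem (sev : Option String) : severity_weight_py sev ∈ pvScale := by
  have ht : pvSeverityTable = PySem.Dict.mk
      [("critical", 100), ("high", 70), ("medium", 40), ("low", 15), ("warning", 25), ("info", 5)] := rfl
  unfold severity_weight_py pvScale
  rw [ht]
  generalize PySem.Str.lower (sev.getD "") = s
  simp only [PySem.Dict.getD, PySem.Dict.get?_mk_cons]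
  split_ifs <;> simp [PySem.Dict.get?]

-- updating a set with elements it already has is the identity
theorem pvSet_update_subset (s : PySem.Set Int) (xs : List Int)
    (h : ∀ x ∈ xs, x ∈ s) : PySem.Set.update s xs = s := by
  rw [PySem.Set.update_eq_append_filter]
  have : (PySem.Set.ofList xs).filter (fun y => !s.contains y) = [] := by
    rw [List.filter_eq_nil_iff]
    intro y hy
    have hys := h y ((PySem.Set.mem_ofList xs y).mp hy)
    simpa using hys
  rw [this, List.append_nil]

-- the final buckets, read back: keys are the scale, bucket w is the w-filter of the kept list
theorem pvBuckets_spec (l : List (List (String × String))) :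
    (l.foldl (fun d f => d.modify (pvWt f) [] (fun b => b ++ [f])) pvInitBuckets).values
      = pvScale.map (fun w => l.filter (fun f => pvWt f == w)) := by
  set D := l.foldl (fun d f => d.modify (pvWt f) [] (fun b => b ++ [f])) pvInitBuckets with hD
  have hkeys0 : pvInitBuckets.keys = pvScale := by decide
  have hkeys : D.keys = pvScale := by
    rw [hD, PySem.Dict.keys_foldl_modify_key l pvWt [] (fun _ f b => b ++ [f]) pvInitBuckets,
      hkeys0]
    exact pvSet_update_subset _ _ (by
      intro x hx
      obtain ⟨f, _, rfl⟩ := List.mem_map.mp hx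
      exact severity_weight_mem _)
  have hnd : D.keys.Nodup := by rw [hkeys]; decide
  have hget : ∀ w, D.getD w [] = l.filter (fun f => pvWt f == w) := by
    intro w
    have hfold : D = (l.map (fun f => (pvWt f, f))).foldl
        (fun d p => d.modify p.1 [] (fun b => b ++ [p.2])) pvInitBuckets := by
      rw [hD, List.foldl_map]
    rw [hfold, PySem.Dict.getD_foldl_modify_append]
    have h0 : pvInitBuckets.getD w [] = [] := by
      by_cases hw : w ∈ pvScale
      · fin_cases hw <;> decide
      · exact PySem.Dict.getD_of_not_contains _ [] (by
          rw [PySem.Dict.contains_eq_decide_mem_keys, hkeys0]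
          simpa using hw)
    rw [h0, List.nil_append, List.filter_map]
    have : List.map (fun x => x.2) (List.map (fun f => (pvWt f, f))
        (List.filter ((fun p => p.1 == w) ∘ fun f => (pvWt f, f)) l))
        = List.filter (fun f => pvWt f == w) l := by
      rw [List.map_map]; simp [Function.comp_def]
    exact this
  rw [PySem.Dict.values_eq_map_keys D hnd [], hkeys]
  exact List.map_congr_left (fun w _ => hget w)

-- folding ++ over the buckets is their concatenation
theorem pvFoldl_append_flatten {α : Type} (ls : List (List α)) :
    ls.foldl (· ++ ·) ([] : List α) = ls.flatten := by
  induction ls using List.reverseRecOn with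
  | nil => rfl
  | append_singleton ls' x ih => rw [List.foldl_append, List.flatten_append]; simp [ih]

-- ====== A's side: the stable reverse sort over a scale-confined key is bucketing ======

-- insert skips a prefix it never goes before
theorem insertBy_append_of_not_before {α : Type} (before : α → α → Bool) (x : α)
    (g r : List α) (hg : ∀ y ∈ g, before x y = false) :
    PySem.List.insertBy before x (g ++ r) = g ++ PySem.List.insertBy before x r := by
  induction g with
  | nil => rfl
  | cons y g' ih =>
    have hy : before x y = false := hg y (by simp)
    simp only [List.cons_append, PySem.List.insertBy, hy]
    simp [ih (fun z hz => hg z (by simp [hz]))]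

-- insert at the front of a list it goes before everywhere
theorem insertBy_cons_of_all_before {α : Type} (before : α → α → Bool) (x : α)
    (r : List α) (hr : ∀ y ∈ r, before x y = true) :
    PySem.List.insertBy before x r = x :: r := by
  cases r with
  | nil => rfl
  | cons z r' => simp [PySem.List.insertBy, hr z (by simp)]

-- keys of a bucketed list over a strictly descending scale
theorem mem_buckets_key {α : Type} (key : α → Int) (l : List α) (ws : List Int) :
    ∀ y ∈ ws.flatMap (fun w => l.filter (fun z => key z == w)), key y ∈ ws := by
  intro y hy
  simp only [List.mem_flatMap, List.mem_filter] at hy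
  obtain ⟨w, hw, _, hk⟩ := hy
  simpa [beq_iff_eq.mp hk] using hw

-- inserting one element into a bucketed list appends it to its bucket
theorem insertBy_buckets {α : Type} (key : α → Int) (x : α) (ws : List Int)
    (hws : ws.Pairwise (· > ·)) (l : List α) (hx : key x ∈ ws) :
    PySem.List.insertBy (fun a b => decide (key b < key a)) x
        (ws.flatMap (fun w => l.filter (fun y => key y == w)))
      = ws.flatMap (fun w => (l ++ [x]).filter (fun y => key y == w)) := by
  induction ws with
  | nil => simp at hx
  | cons w ws' ih =>
    rw [List.pairwise_cons] at hws
    obtain ⟨hlt, htail⟩ := hws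
    simp only [List.flatMap_cons]
    by_cases hxw : key x = w
    · have hothers : ∀ w' ∈ ws', ((l ++ [x]).filter (fun y => key y == w')) = l.filter (fun y => key y == w') := by
        intro w' hw'
        have : (key x == w') = false := by
          have := hlt w' hw'; simp [hxw]; omega
        simp [List.filter_append, this]
      rw [insertBy_append_of_not_before _ x _ _ (by
        intro y hy
        have : key y = w := beq_iff_eq.mp (List.mem_filter.mp hy).2
        simp [this, hxw])]
      rw [insertBy_cons_of_all_before _ x _ (by
        intro y hy
        have hk := mem_buckets_key key l ws' y hy
        have := hlt _ hk
        simp [hxw]; omega)]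
      have hgx : (l ++ [x]).filter (fun y => key y == w) = l.filter (fun y => key y == w) ++ [x] := by
        simp [List.filter_append, hxw]
      have hrest : ws'.flatMap (fun w' => (l ++ [x]).filter (fun y => key y == w'))
          = ws'.flatMap (fun w' => l.filter (fun y => key y == w')) :=
        List.flatMap_congr hothers
      rw [hgx, hrest]
      simp
    · have hx' : key x ∈ ws' := by
        rcases List.mem_cons.mp hx with h | h
        · exact absurd h hxw
        · exact h
      have hxlt : key x < w := hlt _ hx'
      rw [insertBy_append_of_not_before _ x _ _ (by
        intro y hy
        have : key y = w := beq_iff_eq.mp (List.mem_filter.mp hy).2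
        simp [this]; omega)]
      rw [ih htail hx']
      have : (l ++ [x]).filter (fun y => key y == w) = l.filter (fun y => key y == w) := by
        have : (key x == w) = false := by simp [hxw]
        simp [List.filter_append, this]
      rw [this]

-- the stable reverse sort over a key confined to a strictly descending scale is bucketing
theorem sorted_rev_eq_buckets {α : Type} (key : α → Int) (ws : List Int)
    (hws : ws.Pairwise (· > ·)) (l : List α) (hl : ∀ x ∈ l, key x ∈ ws) :
    PySem.List.sorted l key true = ws.flatMap (fun w => l.filter (fun y => key y == w)) := by
  rw [PySem.List.sorted_rev_eq_foldl_insertBy]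
  induction l using List.reverseRecOn with
  | nil => simp
  | append_singleton l' x ih =>
    rw [List.foldl_append]
    simp only [List.foldl_cons, List.foldl_nil]
    rw [ih (fun y hy => hl y (by simp [hy]))]
    exact insertBy_buckets key x ws hws l' (hl x (by simp))

-- ===== VERDICT (by name: the statement is the Claim_ definition above) =====
theorem dedupe_and_rank_py_spec : Claim_equal_dedupe_and_rank_py := by
  intro flags _
  unfold Spec_dedupe_and_rank_py dedupe_and_rank_py dedupe_and_rank_py_alt
  rw [pvDistribute_eq, ← pvDedupA_snd, pvBuckets_spec, pvFoldl_append_flatten,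
    ← List.flatMap_def]
  exact sorted_rev_eq_buckets pvWt pvScale (by decide) _ (fun x _ => severity_weight_mem _)
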